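-- pv_equiv track=rewrite | github.com/PapaBear1981/SupplyLine-MRO-Suite | backend/routes_attachments.py | allowed_file
-- ===== SOURCE A (Python) =====
-- ALLOWED_EXTENSIONS = {
--     'images': {'png', 'jpg', 'jpeg', 'gif', 'bmp', 'webp'},
--     'documents': {'pdf', 'doc', 'docx', 'txt', 'rtf', 'odt'},
--     'spreadsheets': {'xls', 'xlsx', 'csv', 'ods'},
--     'archives': {'zip', 'tar', 'gz', '7z'},
-- }
--
-- def allowed_file(filename):
--     """Check if file extension is allowed"""
--     if '.' not in filename:
--         return False
--     ext = filename.rsplit('.', 1)[1].lower()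
--     all_extensions = set()
--     for category in ALLOWED_EXTENSIONS.values():
--         all_extensions.update(category)
--     return ext in all_extensions
-- ===== SOURCE B (Python) =====
-- ALLOWED_EXTENSIONS = {
--     'images': {'png', 'jpg', 'jpeg', 'gif', 'bmp', 'webp'},
--     'documents': {'pdf', 'doc', 'docx', 'txt', 'rtf', 'odt'},
--     'spreadsheets': {'xls', 'xlsx', 'csv', 'ods'},
--     'archives': {'zip', 'tar', 'gz', '7z'},
-- }
--
-- # Precomputed once at import time: every allowed extension as a dotted suffix.
-- ALLOWED_SUFFIXES = tuple('.' + e for cat in ALLOWED_EXTENSIONS.values() for e in cat)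
--
--
-- def allowed_file(filename):
--     """Check if file extension is allowed"""
--     if '.' not in filename:
--         return False
--     return filename.lower().endswith(ALLOWED_SUFFIXES)
-- ===== Notes on version B (the rewrite author's own statement) =====
-- stated objective: idiomatic
-- what changed: Instead of splitting off the last extension and testing membership in a set rebuilt from the category dict on every call, B precomputes the dotted suffixes once and answers with a single str.endswith against that tuple on the lowercased filename.
import Mathlib
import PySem

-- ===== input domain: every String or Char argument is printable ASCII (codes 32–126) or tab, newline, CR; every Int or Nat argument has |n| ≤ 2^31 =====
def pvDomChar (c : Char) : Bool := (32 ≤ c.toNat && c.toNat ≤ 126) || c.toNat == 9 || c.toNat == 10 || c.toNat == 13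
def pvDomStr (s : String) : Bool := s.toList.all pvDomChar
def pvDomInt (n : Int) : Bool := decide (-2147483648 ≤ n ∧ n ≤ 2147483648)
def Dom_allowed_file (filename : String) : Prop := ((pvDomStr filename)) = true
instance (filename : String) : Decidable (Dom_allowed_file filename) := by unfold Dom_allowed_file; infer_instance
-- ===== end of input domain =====

-- B replaces A's split-the-extension-and-rebuild-a-set-per-call strategy by one precomputed
-- tuple of dotted suffixes and a single endswith on the lowercased filename (idiomatic).

-- ===== PORT A =====
-- ALLOWED_EXTENSIONS.values(): the four category sets, in dict insertion order.
def pvExtCats : List (List (List Char)) :=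
  [ [ "png".toList, "jpg".toList, "jpeg".toList, "gif".toList, "bmp".toList, "webp".toList ],
    [ "pdf".toList, "doc".toList, "docx".toList, "txt".toList, "rtf".toList, "odt".toList ],
    [ "xls".toList, "xlsx".toList, "csv".toList, "ods".toList ],
    [ "zip".toList, "tar".toList, "gz".toList, "7z".toList ] ]

def allowed_file (filename : String) : Bool :=
  let l := filename.toList
  if PySem.Chars.isIn ['.'] l = false then false
  else
    -- filename.rsplit('.', 1)[1]: exact under the guard '.' ∈ l — the segment after the LAST '.'
    let ext := PySem.Chars.lower ((l.reverse.takeWhile (fun c => !(c == '.'))).reverse)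
    -- all_extensions = set(); for category in values: all_extensions.update(category)
    let allExts := pvExtCats.foldl PySem.Set.update PySem.Set.empty
    PySem.Set.contains allExts ext

-- ===== PORT B =====
-- ALLOWED_SUFFIXES = tuple('.' + e for cat in ALLOWED_EXTENSIONS.values() for e in cat)
def pvSuffixes : List (List Char) :=
  pvExtCats.flatMap (fun cat => cat.map (fun e => '.' :: e))

def allowed_file_alt (filename : String) : Bool :=
  if PySem.Chars.isIn ['.'] filename.toList = false then false
  else
    -- filename.lower().endswith(ALLOWED_SUFFIXES): true iff some suffix matches
    pvSuffixes.any (fun suf => PySem.Chars.endswith (PySem.Chars.lower filename.toList) suf)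

-- ===== PRECONDITION & SPEC =====
def Spec_allowed_file (filename : String) (out : Bool) : Prop := out = allowed_file_alt filename
instance (filename : String) (out : Bool) : Decidable (Spec_allowed_file filename out) := by unfold Spec_allowed_file; infer_instance

-- ===== CLAIM (what is proved, stated in full; the proofs are below) =====
def Claim_equal_allowed_file : Prop := ∀ (filename : String), Dom_allowed_file filename → Spec_allowed_file filename (allowed_file filename)

-- ===== LEMMAS AND PROOFS =====

-- lowering a character never creates or destroys a '.'
theorem pv_lowerChar_dot (c : Char) : (!(PySem.Chars.lowerChar c == '.')) = (!(c == '.')) := by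
  simp only [PySem.Chars.lowerChar, PySem.Chars.isupper]
  split_ifs with h
  · simp only [Bool.and_eq_true, decide_eq_true_eq] at h
    have h1 : 65 ≤ c.toNat := h.1
    have h2 : c.toNat ≤ 90 := h.2
    have hv : (c.toNat + 32).isValidChar := by
      left; omega
    have hne : Char.ofNat (c.toNat + 32) ≠ '.' := by
      intro he
      have := congrArg Char.toNat he
      rw [Char.toNat_ofNat, if_pos hv] at this
      have h46 : ('.' : Char).toNat = 46 := by decide
      rw [h46] at this; omega
    have hne' : c ≠ '.' := by
      intro he; subst he; revert h1; decide
    simp [hne, hne']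
  · rfl

-- the last '.'-separated segment of the lowercased string is the lowercased last segment
theorem pv_lastSeg_lower (l : List Char) :
    ((PySem.Chars.lower l).reverse.takeWhile (fun c => !(c == '.'))).reverse
      = PySem.Chars.lower ((l.reverse.takeWhile (fun c => !(c == '.'))).reverse) := by
  have hp : (fun c => !(c == '.')) ∘ PySem.Chars.lowerChar = (fun c => !(c == '.')) := by
    funext c; exact pv_lowerChar_dot c
  simp [PySem.Chars.lower, ← List.map_reverse, List.takeWhile_map, hp]

-- takeWhile of (all-true prefix ++ failing head ++ rest) is that prefix
theorem pv_takeWhile_append_not {p : Char → Bool} {a : Char} (xs t : List Char)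
    (hall : ∀ x ∈ xs, p x = true) (hp : p a = false) :
    (xs ++ a :: t).takeWhile p = xs := by
  induction xs with
  | nil => simp [hp]
  | cons c cs ih =>
      have hc : p c = true := hall c (by simp)
      simp [hc, ih (fun x hx => hall x (by simp [hx]))]

-- a list containing '.' splits as takeWhile ++ '.' :: tail-of-dropWhile
theorem pv_take_drop (r : List Char) (hr : '.' ∈ r) :
    r.takeWhile (fun c => !(c == '.')) ++ '.' :: (r.dropWhile (fun c => !(c == '.'))).tail = r := by
  induction r with
  | nil => cases hr
  | cons c cs ih =>
      by_cases hc : c = '.'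
      · subst hc; simp [List.takeWhile, List.dropWhile]
      · have hmem : '.' ∈ cs := by
          rcases List.mem_cons.mp hr with h | h
          · exact absurd h.symm hc
          · exact h
        have hb : (!(c == '.')) = true := by simp [hc]
        simp [List.takeWhile, List.dropWhile, hb, ih hmem]

-- core: for a dot-free extension e, l ends with '.'++e iff the last segment of l is e
theorem pv_ends_iff (l e : List Char) (he : '.' ∉ e) (hl : '.' ∈ l) :
    PySem.Chars.endswith l ('.' :: e)
      = ((l.reverse.takeWhile (fun c => !(c == '.'))).reverse == e) := by
  rw [Bool.eq_iff_iff, PySem.Chars.endswith_iff, beq_iff_eq]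
  have hrev : ('.' :: e) <:+ l ↔ (e.reverse ++ ['.']) <+: l.reverse := by
    rw [← List.reverse_prefix]; simp
  rw [hrev]
  have hall : ∀ x ∈ e.reverse, (!(x == '.')) = true := by
    intro x hx; simp only [List.mem_reverse] at hx
    simp; rintro rfl; exact he hx
  constructor
  · rintro ⟨t, ht⟩
    have hTake : l.reverse.takeWhile (fun c => !(c == '.')) = e.reverse := by
      rw [← ht, List.append_assoc]
      exact pv_takeWhile_append_not e.reverse ('.' :: t).tail hall (by decide)
    rw [hTake, List.reverse_reverse]
  · intro h
    have hTake : l.reverse.takeWhile (fun c => !(c == '.')) = e.reverse := by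
      have := congrArg List.reverse h; simpa using this
    refine ⟨(l.reverse.dropWhile (fun c => !(c == '.'))).tail, ?_⟩
    rw [List.append_assoc, ← hTake]
    exact pv_take_drop l.reverse (by simpa using hl)

-- the flattened literal list of all 20 allowed extensions
def pvAllExts : List (List Char) := pvExtCats.flatten

theorem pv_fold_eq : pvExtCats.foldl PySem.Set.update PySem.Set.empty = pvAllExts := by decide

theorem pv_suffixes_eq : pvSuffixes = pvAllExts.map (fun e => '.' :: e) := by decide

theorem pv_no_dot : ∀ e ∈ pvAllExts, '.' ∉ e := by decide

theorem allowed_file_spec : Claim_equal_allowed_file := by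
  intro f _
  unfold Spec_allowed_file allowed_file allowed_file_alt
  by_cases hg : PySem.Chars.isIn ['.'] f.toList = false
  · simp [hg]
  · simp only [hg]
    have hdot : '.' ∈ f.toList := by
      have : PySem.Chars.isIn ['.'] f.toList = true := by
        cases h : PySem.Chars.isIn ['.'] f.toList
        · exact absurd h hg
        · rfl
      rw [PySem.Chars.isIn_iff_infix, List.singleton_infix_iff] at this
      exact this
    have hdotlow : '.' ∈ PySem.Chars.lower f.toList := by
      simp only [PySem.Chars.lower, List.mem_map]
      exact ⟨'.', hdot, by decide⟩
    rw [pv_fold_eq, pv_suffixes_eq, PySem.Set.contains, List.contains_eq_any_beq,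
      List.any_map]
    refine PySem.List.any_congr_mem ?_
    intro e hme
    show (PySem.Chars.lower ((f.toList.reverse.takeWhile (fun c => !(c == '.'))).reverse) == e)
        = PySem.Chars.endswith (PySem.Chars.lower f.toList) ('.' :: e)
    rw [pv_ends_iff _ e (pv_no_dot e hme) hdotlow, pv_lastSeg_lower]

-- ===== VERDICT (by name: the statement is the Claim_ definition above) =====
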